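-- pv_equiv track=rewrite | github.com/Chovhan/Delphi | Day_1/Task_6.py | calculate_pixels
-- ===== SOURCE A (Python) =====
-- def calculate_pixels(image_array):
--     white, black, gray = 0, 0, 0
--     for i in range(len(image_array)):
--         for j in range(len(image_array[i])):
--             for z in range(len(image_array[i][j])):
--                 if image_array[i][j][z] == 0:
--                     black += 1
--                 elif image_array[i][j][z] == 255:
--                     white += 1
--                 else:
--                     gray += 1
--     return [white, black, gray]
-- ===== SOURCE B (Python) =====
-- def calculate_pixels(image_array):
--     flat = [v for plane in image_array for row in plane for v in row]
--     black = flat.count(0)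
--     white = flat.count(255)
--     return [white, black, len(flat) - black - white]
-- ===== Notes on version B (the rewrite author's own statement) =====
-- stated objective: idiomatic
-- what changed: Replaces the triple index-based loop with per-pixel if/elif branching by a single flatten followed by list.count lookups, deriving gray as total minus black minus white.
import Mathlib
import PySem

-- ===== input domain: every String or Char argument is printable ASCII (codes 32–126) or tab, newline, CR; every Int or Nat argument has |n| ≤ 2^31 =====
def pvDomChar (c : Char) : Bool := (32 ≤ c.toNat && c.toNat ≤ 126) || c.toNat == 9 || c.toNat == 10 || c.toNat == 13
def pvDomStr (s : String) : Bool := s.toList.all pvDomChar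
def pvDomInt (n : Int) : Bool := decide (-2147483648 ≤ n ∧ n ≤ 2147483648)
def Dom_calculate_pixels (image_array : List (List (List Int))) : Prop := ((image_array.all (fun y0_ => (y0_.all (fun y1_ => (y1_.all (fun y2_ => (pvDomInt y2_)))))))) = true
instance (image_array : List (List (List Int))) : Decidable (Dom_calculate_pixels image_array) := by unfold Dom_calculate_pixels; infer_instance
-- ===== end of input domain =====

-- B flattens the 3-D array once and uses list.count plus a subtraction instead of A's
-- triple index loop with per-pixel if/elif/else branching (objective: idiomatic; same cost).

-- ===== PORT A =====
-- state is (white, black, gray), updated per pixel exactly as A's branches do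
def pixStep (s : Int × Int × Int) (v : Int) : Int × Int × Int :=
  if v = 0 then (s.1, s.2.1 + 1, s.2.2)
  else if v = 255 then (s.1 + 1, s.2.1, s.2.2)
  else (s.1, s.2.1, s.2.2 + 1)

def calculate_pixels (image_array : List (List (List Int))) : List Int :=
  let s := image_array.foldl
    (fun s plane => plane.foldl (fun s row => row.foldl pixStep s) s) (0, 0, 0)
  [s.1, s.2.1, s.2.2]

-- ===== PORT B =====
def calculate_pixels_alt (image_array : List (List (List Int))) : List Int :=
  let flat := image_array.flatMap (fun plane => plane.flatMap (fun row => row))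
  let black : Int := PySem.List.count flat 0
  let white : Int := PySem.List.count flat 255
  [white, black, (flat.length : Int) - black - white]

-- ===== PRECONDITION & SPEC =====
def Spec_calculate_pixels (image_array : List (List (List Int))) (out : List Int) : Prop := out = calculate_pixels_alt image_array
instance (image_array : List (List (List Int))) (out : List Int) : Decidable (Spec_calculate_pixels image_array out) := by unfold Spec_calculate_pixels; infer_instance

-- ===== CLAIM (what is proved, stated in full; the proofs are below) =====
def Claim_equal_calculate_pixels : Prop := ∀ (image_array : List (List (List Int))), Dom_calculate_pixels image_array → Spec_calculate_pixels image_array (calculate_pixels image_array)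

-- ===== LEMMAS AND PROOFS =====

theorem pixStep_foldl (l : List Int) (s : Int × Int × Int) :
    l.foldl pixStep s =
      (s.1 + (l.count 255 : Int), s.2.1 + (l.count 0 : Int),
       s.2.2 + ((l.length : Int) - (l.count 0 : Int) - (l.count 255 : Int))) := by
  induction l generalizing s with
  | nil => simp
  | cons x xs ih =>
    simp only [List.foldl_cons, ih, List.count_cons, List.length_cons, pixStep]
    by_cases h0 : x = 0
    · simp [h0, Prod.ext_iff]; push_cast; omega
    · by_cases h255 : x = 255
      · simp [h0, h255, Prod.ext_iff]; push_cast; omega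
      · simp [h0, h255, Prod.ext_iff]; push_cast; omega

theorem nested_foldl_eq_flat (image_array : List (List (List Int))) (s : Int × Int × Int) :
    image_array.foldl (fun s plane => plane.foldl (fun s row => row.foldl pixStep s) s) s =
      (image_array.flatMap (fun plane => plane.flatMap (fun row => row))).foldl pixStep s := by
  induction image_array generalizing s with
  | nil => simp
  | cons p ps ih =>
    simp only [List.foldl_cons, List.flatMap_cons, List.foldl_append, ih]
    congr 1
    induction p generalizing s with
    | nil => simp
    | cons r rs ihp => simp only [List.foldl_cons, List.flatMap_cons, List.foldl_append, ihp]

-- ===== VERDICT (by name: the statement is the Claim_ definition above) =====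
theorem calculate_pixels_spec : Claim_equal_calculate_pixels := by
  intro image_array _
  simp only [Spec_calculate_pixels, calculate_pixels, calculate_pixels_alt]
  rw [nested_foldl_eq_flat, pixStep_foldl]
  simp [PySem.List.count, List.count]
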